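-- pv_equiv track=rewrite | github.com/Vijayganesh3107/Connect4_AI | MaxConnect4Game.py | ThreeHorizontalStreak
-- ===== SOURCE A (Python) =====
-- def ThreeHorizontalStreak(rowno,colno,turn,state):
--     sum=3
--     count=0
--     for j in range(colno,7):
--         if(state[rowno][j]==turn):
--             count+=1
--         else:
--             break
--     if(count>=sum):
--         return 1
--     else:
--         return 0
-- ===== SOURCE B (Python) =====
-- def ThreeHorizontalStreak(rowno, colno, turn, state):
--     return 1 if colno + 2 <= 6 and all(state[rowno][colno + i] == turn for i in range(3)) else 0
-- ===== Notes on version B (the rewrite author's own statement) =====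
-- stated objective: simpler
-- what changed: Replaces the counting scan over range(colno,7) with break and a threshold test by a closed-form one-liner: a bounds guard colno+2<=6 plus a direct all() test of the three cells colno..colno+2.
import Mathlib
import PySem

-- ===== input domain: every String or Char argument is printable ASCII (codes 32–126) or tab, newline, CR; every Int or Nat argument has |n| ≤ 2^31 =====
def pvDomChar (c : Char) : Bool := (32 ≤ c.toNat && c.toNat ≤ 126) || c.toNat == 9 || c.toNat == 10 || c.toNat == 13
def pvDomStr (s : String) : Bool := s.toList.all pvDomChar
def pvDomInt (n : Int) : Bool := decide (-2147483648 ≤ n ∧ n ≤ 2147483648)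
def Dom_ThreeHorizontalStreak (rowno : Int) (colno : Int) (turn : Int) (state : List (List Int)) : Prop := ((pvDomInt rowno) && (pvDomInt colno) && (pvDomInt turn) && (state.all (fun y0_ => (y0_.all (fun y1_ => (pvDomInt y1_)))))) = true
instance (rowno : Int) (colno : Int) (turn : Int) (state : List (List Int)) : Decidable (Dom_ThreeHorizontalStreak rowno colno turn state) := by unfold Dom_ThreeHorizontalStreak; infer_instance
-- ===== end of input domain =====

-- B replaces A's counting scan with break by a closed-form guard-plus-three-cell test (objective: simpler).

-- ===== PORT A =====
-- state[rowno][j] (Python indexing, negative indices from the end; none = IndexError)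
def pvCell (state : List (List Int)) (rowno : Int) (j : Int) : Option Int :=
  (PySem.List.pyGet? state rowno).bind (fun row => PySem.List.pyGet? row j)

-- the 'for j in range(colno,7)' loop with its break, carrying the running count
def pvCountA (state : List (List Int)) (rowno : Int) (turn : Int) : List Int → Int → Int
  | [], count => count
  | j :: js, count =>
      if pvCell state rowno j = some turn then pvCountA state rowno turn js (count + 1)
      else count

def ThreeHorizontalStreak (rowno : Int) (colno : Int) (turn : Int) (state : List (List Int)) : Int :=
  let sum : Int := 3
  let count : Int := pvCountA state rowno turn (PySem.List.pyRange colno 7 1) 0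
  if count ≥ sum then 1 else 0

-- ===== PORT B =====
def ThreeHorizontalStreak_alt (rowno : Int) (colno : Int) (turn : Int) (state : List (List Int)) : Int :=
  if colno + 2 ≤ 6 ∧ (List.range 3).all (fun i => pvCell state rowno (colno + (i : Int)) == some turn) then 1 else 0

-- ===== PRECONDITION & SPEC =====
-- Pre_ excludes exactly the inputs on which A raises IndexError (out-of-range rowno with colno < 7,
-- colno below -len(row), or a scan that runs past the end of a row shorter than 7 without meeting a mismatch).
def Pre_ThreeHorizontalStreak (rowno : Int) (colno : Int) (turn : Int) (state : List (List Int)) : Prop :=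
  7 ≤ colno ∨
    ((-(state.length : Int) ≤ rowno ∧ rowno < state.length) ∧
      (let row := (PySem.List.pyGet? state rowno).getD []
       (-(row.length : Int) ≤ colno ∧
         (7 ≤ (row.length : Int) ∨
           (PySem.List.pyRange colno (min 7 (row.length : Int)) 1).any
             (fun j => !(PySem.List.pyGet? row j == some turn)) = true))))
instance (rowno : Int) (colno : Int) (turn : Int) (state : List (List Int)) : Decidable (Pre_ThreeHorizontalStreak rowno colno turn state) := by unfold Pre_ThreeHorizontalStreak; infer_instance

def pvWitness_ThreeHorizontalStreak : Int × Int × Int × List (List Int) := (0, 0, 1, [[1, 1, 0, 1, 1, 1, 2]])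

def Spec_ThreeHorizontalStreak (rowno : Int) (colno : Int) (turn : Int) (state : List (List Int)) (out : Int) : Prop := out = ThreeHorizontalStreak_alt rowno colno turn state
instance (rowno : Int) (colno : Int) (turn : Int) (state : List (List Int)) (out : Int) : Decidable (Spec_ThreeHorizontalStreak rowno colno turn state out) := by unfold Spec_ThreeHorizontalStreak; infer_instance

-- ===== CLAIM (what is proved, stated in full; the proofs are below) =====
def Claim_equal_ThreeHorizontalStreak : Prop := ∀ (rowno : Int) (colno : Int) (turn : Int) (state : List (List Int)), Dom_ThreeHorizontalStreak rowno colno turn state → Pre_ThreeHorizontalStreak rowno colno turn state → Spec_ThreeHorizontalStreak rowno colno turn state (ThreeHorizontalStreak rowno colno turn state)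

-- ===== LEMMAS AND PROOFS =====

theorem pvCountA_le (state : List (List Int)) (rowno turn : Int) (js : List Int) (c : Int) :
    pvCountA state rowno turn js c ≤ c + js.length := by
  induction js generalizing c with
  | nil => simp [pvCountA]
  | cons j js ih =>
      simp only [pvCountA, List.length_cons]
      split
      · have := ih (c + 1); omega
      · omega

theorem pvCountA_ge (state : List (List Int)) (rowno turn : Int) (js : List Int) (c : Int) :
    c ≤ pvCountA state rowno turn js c := by
  induction js generalizing c with
  | nil => simp [pvCountA]
  | cons j js ih =>
      simp only [pvCountA]
      split
      · have := ih (c + 1); omega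
      · omega

-- count ≥ 3 on a list with at least three elements ↔ the first three cells match
theorem pvCountA_three (state : List (List Int)) (rowno turn : Int) (a b c : Int) (rest : List Int) :
    (3 ≤ pvCountA state rowno turn (a :: b :: c :: rest) 0) ↔
      (pvCell state rowno a = some turn ∧ pvCell state rowno b = some turn ∧
        pvCell state rowno c = some turn) := by
  simp only [pvCountA]
  split_ifs <;> simp_all
  have := pvCountA_ge state rowno turn rest 3; omega

theorem pv_main (rowno colno turn : Int) (state : List (List Int)) :
    ThreeHorizontalStreak rowno colno turn state = ThreeHorizontalStreak_alt rowno colno turn state := by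
  by_cases h5 : 5 ≤ colno
  · -- at most two columns in range(colno,7): count < 3, and B's guard colno+2 ≤ 6 fails
    have hlen : (PySem.List.pyRange colno 7 1).length = (7 - colno).toNat :=
      PySem.List.length_pyRange_one colno 7
    have hle := pvCountA_le state rowno turn (PySem.List.pyRange colno 7 1) 0
    rw [hlen] at hle
    simp only [ThreeHorizontalStreak, ThreeHorizontalStreak_alt]
    rw [if_neg (by omega), if_neg (by omega)]
  · -- colno ≤ 4: the range starts colno :: colno+1 :: colno+2 :: …
    rw [not_le] at h5
    simp only [ThreeHorizontalStreak, ThreeHorizontalStreak_alt]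
    rw [PySem.List.pyRange_one_cons (by omega),
        PySem.List.pyRange_one_cons (by omega),
        PySem.List.pyRange_one_cons (by omega)]
    rw [show colno + 1 + 1 = colno + 2 by ring, show colno + 2 + 1 = colno + 3 by ring]
    have h3 := pvCountA_three state rowno turn colno (colno + 1) (colno + 2)
      (PySem.List.pyRange (colno + 3) 7 1)
    have hall : ((List.range 3).all (fun i => pvCell state rowno (colno + (i : Int)) == some turn)) =
        ((pvCell state rowno colno == some turn) &&
         (pvCell state rowno (colno + 1) == some turn) &&
         (pvCell state rowno (colno + 2) == some turn)) := by
      have : List.range 3 = [0, 1, 2] := by decide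
      rw [this]
      simp only [List.all_cons, List.all_nil, Bool.and_true]
      norm_num
      simp only [Bool.and_assoc]
    by_cases hmatch : pvCell state rowno colno = some turn ∧
        pvCell state rowno (colno + 1) = some turn ∧ pvCell state rowno (colno + 2) = some turn
    · rw [if_pos (by rw [ge_iff_le, h3]; exact hmatch),
          if_pos ⟨by omega, by simp [hall, hmatch.1, hmatch.2.1, hmatch.2.2]⟩]
    · rw [if_neg (by rw [ge_iff_le, h3]; exact hmatch),
          if_neg (by
            rintro ⟨-, hb⟩
            rw [hall] at hb
            simp only [Bool.and_eq_true, beq_iff_eq] at hb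
            exact hmatch ⟨hb.1.1, hb.1.2, hb.2⟩)]

-- ===== VERDICT (by name: the statement is the Claim_ definition above) =====
theorem ThreeHorizontalStreak_spec : Claim_equal_ThreeHorizontalStreak := by
  intro rowno colno turn state _ _
  unfold Spec_ThreeHorizontalStreak
  exact pv_main rowno colno turn state
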